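-- pv_equiv track=rewrite | github.com/Asgef/my_practice | my_practice/finite_automaton_lexer.py | lexer
-- ===== SOURCE A (Python) =====
-- def lexer(text: str) -> list:
--     result = []
--     text_array = []
--     state = 'outside_word'  # inside_word
--     word_ln = ''
--
--     for char in text:
--         if char == '\n':
--             text_array.append(word_ln)
--             word_ln = ''
--         else:
--             word_ln += char
--     text_array.append(word_ln)
--
--
--     for line in text_array:
--         word = ''
--         for idx in range(len(line)):
--             symbol = line[idx]
--
--             if state == 'inside_word':
--                 if symbol == ' ':
--                     result.append(word)
--                     word = ''
--                     state = 'outside_word'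
--                     break
--                 word += symbol
--
--             elif state == 'outside_word':
--                 if symbol != ' ':
--                     state = 'inside_word'
--                     word += symbol
--                 else:
--                     continue
--         state = 'outside_word'
--
--
--         if word:
--             result.append(word)
--
--     return result
-- ===== SOURCE B (Python) =====
-- def lexer(text: str) -> list:
--     result = []
--     for line in text.split('\n'):
--         stripped = line.lstrip(' ')
--         if stripped:
--             result.append(stripped.split(' ', 1)[0])
--     return result
-- ===== Notes on version B (the rewrite author's own statement) =====
-- stated objective: simpler
-- what changed: Replaced the char-by-char two-state automaton (manual line buffer, word buffer, inside/outside state with break) by library string operations: split into lines, strip leading spaces, take the first space-delimited token of each non-blank line.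
import Mathlib
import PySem

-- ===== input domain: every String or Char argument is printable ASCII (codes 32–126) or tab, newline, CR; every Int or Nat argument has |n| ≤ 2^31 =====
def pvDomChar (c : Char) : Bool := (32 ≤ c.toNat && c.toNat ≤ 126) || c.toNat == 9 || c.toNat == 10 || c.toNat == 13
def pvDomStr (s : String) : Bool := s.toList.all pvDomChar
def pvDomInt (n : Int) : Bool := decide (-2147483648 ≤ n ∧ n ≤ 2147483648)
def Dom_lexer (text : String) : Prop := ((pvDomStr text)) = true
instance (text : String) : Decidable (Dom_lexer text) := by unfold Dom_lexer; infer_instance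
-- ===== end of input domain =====

-- B replaces A's char-by-char two-state automaton with library string operations
-- (split into lines, strip leading spaces, first space-delimited token); plainer code,
-- and it avoids A's per-character string appends.

-- ===== PORT A =====
-- A's first loop: build text_array by scanning chars, cutting at '\n'
-- (state = (text_array, word_ln)).
def lexerSplitLoop (cs : List Char) (arr : List (List Char)) (w : List Char) :
    List (List Char) × List Char :=
  match cs with
  | [] => (arr, w)
  | c :: rest =>
    if c == '\n' then lexerSplitLoop rest (arr ++ [w]) []
    else lexerSplitLoop rest arr (w ++ [c])

-- A's inner 'for idx in range(len(line))' loop with its break, as the obvious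
-- recursion over the remaining characters; returns (result, state, word) at exit.
def lexerInner (cs : List Char) (state : Bool) (word : List Char)
    (result : List (List Char)) : List (List Char) × Bool × List Char :=
  match cs with
  | [] => (result, state, word)
  | c :: rest =>
    if state then                         -- state == 'inside_word'
      if c == ' ' then (result ++ [word], false, [])   -- append, reset, break
      else lexerInner rest true (word ++ [c]) result
    else                                  -- state == 'outside_word'
      if c != ' ' then lexerInner rest true (word ++ [c]) result
      else lexerInner rest state word result

-- A's outer 'for line in text_array' loop: run the inner loop, reset state,
-- append the leftover word if non-empty.
def lexerOuter (lines : List (List Char)) (state : Bool)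
    (result : List (List Char)) : List (List Char) :=
  match lines with
  | [] => result
  | line :: rest =>
    let r := lexerInner line state [] result
    let result' := if r.2.2 ≠ [] then r.1 ++ [r.2.2] else r.1
    lexerOuter rest false result'        -- state = 'outside_word'

def lexer (text : String) : List String :=
  let p := lexerSplitLoop text.toList [] []
  let textArray := p.1 ++ [p.2]          -- text_array.append(word_ln)
  (lexerOuter textArray false []).map String.ofList

-- ===== PORT B =====
def lexer_alt (text : String) : List String :=
  ((PySem.Chars.splitOn text.toList ['\n']).foldl
    (fun result line =>
      let stripped := line.dropWhile (· == ' ')   -- line.lstrip(' '): exact, drops leading spaces only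
      if stripped.isEmpty then result
      else result ++ [stripped.takeWhile (fun c => !(c == ' '))])  -- line.split(' ', 1)[0]: exact, the chars before the first space
    []).map String.ofList

-- ===== PRECONDITION & SPEC =====
def Spec_lexer (text : String) (out : List String) : Prop := out = lexer_alt text
instance (text : String) (out : List String) : Decidable (Spec_lexer text out) := by unfold Spec_lexer; infer_instance

-- ===== CLAIM (what is proved, stated in full; the proofs are below) =====
def Claim_equal_lexer : Prop := ∀ (text : String), Dom_lexer text → Spec_lexer text (lexer text)

-- ===== LEMMAS AND PROOFS =====

-- reference line-splitting (splitting a char list at '\n', empty pieces kept)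
def pvLines : List Char → List (List Char)
  | [] => [[]]
  | c :: rest => if c == '\n' then [] :: pvLines rest
                 else (pvLines rest).modifyHead (c :: ·)

lemma lexerSplitLoop_eq (cs : List Char) :
    ∀ (arr : List (List Char)) (w : List Char),
      (lexerSplitLoop cs arr w).1 ++ [(lexerSplitLoop cs arr w).2]
        = arr ++ (pvLines cs).modifyHead (w ++ ·) := by
  induction cs with
  | nil => intro arr w; simp [lexerSplitLoop, pvLines]
  | cons c rest ih =>
    intro arr w
    by_cases h : c = '\n'
    · simp only [lexerSplitLoop, pvLines, h, beq_self_eq_true, if_true, ih]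
      rcases pvLines rest with _ | ⟨hd, tl⟩ <;> simp
    · have hb : (c == '\n') = false := by simp [h]
      simp only [lexerSplitLoop, pvLines, hb, if_false, Bool.false_eq_true, ih]
      rcases pvLines rest with _ | ⟨hd, tl⟩ <;> simp

lemma splitOn_go_newline (fuel : Nat) :
    ∀ (cs cur : List Char) (acc : List (List Char)), cs.length < fuel →
      PySem.Chars.splitOn.go ['\n'] fuel cs cur acc
        = acc.reverse ++ (pvLines cs).modifyHead (cur.reverse ++ ·) := by
  induction fuel with
  | zero => intro cs cur acc h; omega
  | succ fuel ih =>
    intro cs cur acc h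
    match cs with
    | [] => simp [PySem.Chars.splitOn.go, pvLines]
    | c :: rest =>
      by_cases hc : c = '\n'
      · subst hc
        have : List.isPrefixOf ['\n'] ('\n' :: rest) = true := by
          simp [List.isPrefixOf]
        simp only [PySem.Chars.splitOn.go, this, if_true, List.length_cons,
          List.length_nil, List.drop_succ_cons, List.drop_zero]
        rw [ih rest [] (cur.reverse :: acc) (by simpa using Nat.lt_of_succ_lt_succ h)]
        simp [pvLines]
        rcases pvLines rest with _ | ⟨hd, tl⟩ <;> simp
      · have hpre : List.isPrefixOf ['\n'] (c :: rest) = false := by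
          simp [List.isPrefixOf]; intro hcontra; exact absurd hcontra.symm hc
        have hb : (c == '\n') = false := by simp [hc]
        simp only [PySem.Chars.splitOn.go, hpre, Bool.false_eq_true, if_false]
        rw [ih rest (c :: cur) acc (by simpa using Nat.lt_of_succ_lt_succ h)]
        simp only [pvLines, hb, Bool.false_eq_true, if_false]
        rcases pvLines rest with _ | ⟨hd, tl⟩ <;> simp

lemma splitOn_newline (cs : List Char) :
    PySem.Chars.splitOn cs ['\n'] = pvLines cs := by
  unfold PySem.Chars.splitOn
  rw [splitOn_go_newline (cs.length + 1) cs [] [] (by omega)]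
  rcases pvLines cs with _ | ⟨hd, tl⟩ <;> simp

-- inner loop, once inside a word: it collects the chars up to the first space
lemma lexerInner_inside (rest : List Char) :
    ∀ (word : List Char) (result : List (List Char)), word ≠ [] →
      (if (lexerInner rest true word result).2.2 ≠ [] then
        (lexerInner rest true word result).1 ++ [(lexerInner rest true word result).2.2]
       else (lexerInner rest true word result).1)
        = result ++ [word ++ rest.takeWhile (fun c => !(c == ' '))] := by
  induction rest with
  | nil => intro word result hw; simp [lexerInner, hw]
  | cons c rest ih =>
    intro word result hw
    by_cases hc : c = ' '
    · simp [lexerInner, hc, List.takeWhile]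
    · have hb : (c == ' ') = false := by simp [hc]
      have h1 : lexerInner (c :: rest) true word result
          = lexerInner rest true (word ++ [c]) result := by
        simp [lexerInner, hb]
      rw [h1, ih (word ++ [c]) result (by simp)]
      simp [List.takeWhile, hb]

-- inner loop from the outside state + A's post-loop append
-- = B's per-line step (first space-delimited token, if any)
lemma lexerInner_line (line : List Char) :
    ∀ (result : List (List Char)),
      (if (lexerInner line false [] result).2.2 ≠ [] then
        (lexerInner line false [] result).1 ++ [(lexerInner line false [] result).2.2]
       else (lexerInner line false [] result).1)
        = (if (line.dropWhile (· == ' ')).isEmpty then result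
           else result ++ [(line.dropWhile (· == ' ')).takeWhile (fun c => !(c == ' '))]) := by
  induction line with
  | nil => intro result; simp [lexerInner]
  | cons c rest ih =>
    intro result
    by_cases hc : c = ' '
    · have hb : (c == ' ') = true := by simp [hc]
      have h1 : lexerInner (c :: rest) false [] result
          = lexerInner rest false [] result := by
        simp only [lexerInner, hc]; simp
      rw [h1, List.dropWhile_cons, hb]
      simpa using ih result
    · have hb : (c == ' ') = false := by simp [hc]
      have h1 : lexerInner (c :: rest) false [] result
          = lexerInner rest true [c] result := by
        simp only [lexerInner]; simp [hc]
      rw [h1, lexerInner_inside rest [c] result (by simp), List.dropWhile_cons, hb]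
      simp [hb]

-- outer loop = B's fold over the lines
lemma lexerOuter_eq (lines : List (List Char)) :
    ∀ (result : List (List Char)),
      lexerOuter lines false result
        = lines.foldl
            (fun result line =>
              let stripped := line.dropWhile (· == ' ')
              if stripped.isEmpty then result
              else result ++ [stripped.takeWhile (fun c => !(c == ' '))])
            result := by
  induction lines with
  | nil => intro result; simp [lexerOuter]
  | cons line rest ih =>
    intro result
    have h1 : lexerOuter (line :: rest) false result
        = lexerOuter rest false
            (if (lexerInner line false [] result).2.2 ≠ [] then
              (lexerInner line false [] result).1 ++ [(lexerInner line false [] result).2.2]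
             else (lexerInner line false [] result).1) := rfl
    rw [h1, lexerInner_line line result, ih]
    simp [List.foldl_cons]

-- ===== VERDICT (by name: the statement is the Claim_ definition above) =====
theorem lexer_spec : Claim_equal_lexer := by
  intro text _
  unfold Spec_lexer
  simp only [lexer, lexer_alt]
  rw [splitOn_newline, lexerSplitLoop_eq text.toList [] [], lexerOuter_eq]
  rcases pvLines text.toList with _ | ⟨hd, tl⟩ <;> simp
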